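-- pv_equiv track=rewrite | github.com/wilsontelab/wilsontew-data-analysis | fix_region_denominator.py | patch_cell_source
-- ===== SOURCE A (Python) =====
-- REPLACEMENT_BLOCK = [
--     "region_summary <- df_loc %>%\n",
--     "  dplyr::filter(!is.na(pair_class), pair_class %in% c('CIS', 'TRANS')) %>%\n",
--     "  dplyr::group_by(batch, pair_class, broken_status, region_class, time_point, time_label) %>%\n",
--     "  dplyr::summarise(count_sum = sum(count, na.rm = TRUE), .groups = 'drop') %>%\n",
--     "  # Denominator is (starting + repaired) = (T0 + T120) within each region grouping\n",
--     "  dplyr::group_by(batch, pair_class, broken_status, region_class) %>%\n",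
--     "  dplyr::mutate(\n",
--     "    denom = sum(count_sum, na.rm = TRUE),\n",
--     "    pct_intact_repaired = ifelse(denom > 0, 100 * count_sum / denom, NA_real_)\n",
--     "  ) %>%\n",
--     "  dplyr::ungroup() %>%\n",
--     "  dplyr::select(-denom)\n",
-- ]
--
-- def patch_cell_source(src: list[str]) -> list[str]:
--     out: list[str] = []
--
--     i = 0
--     while i < len(src):
--         line = src[i]
--
--         if line.strip() == "region_summary <- df_loc %>%":
--             # Find the end of the existing region_summary pipeline.
--             j = i + 1
--             while j < len(src):
--                 if src[j].strip() == "dplyr::ungroup()":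
--                     break
--                 j += 1
--             if j >= len(src):
--                 raise RuntimeError("Could not find end of region_summary block (dplyr::ungroup())")
--
--             out.extend(REPLACEMENT_BLOCK)
--             # Skip the old block INCLUDING the terminating ungroup line.
--             i = j + 1
--             continue
--
--         # Update plot y-axis label if present
--         if "y = '% intact/repaired" in line:
--             out.append("        x = 'Region class', y = '% of (T0 + T120) within region', fill = 'Time'\n")
--             i += 1
--             continue
--
--         out.append(line)
--         i += 1
--
--     return out
-- ===== SOURCE B (Python) =====
-- REPLACEMENT_BLOCK = [
--     "region_summary <- df_loc %>%\n",
--     "  dplyr::filter(!is.na(pair_class), pair_class %in% c('CIS', 'TRANS')) %>%\n",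
--     "  dplyr::group_by(batch, pair_class, broken_status, region_class, time_point, time_label) %>%\n",
--     "  dplyr::summarise(count_sum = sum(count, na.rm = TRUE), .groups = 'drop') %>%\n",
--     "  # Denominator is (starting + repaired) = (T0 + T120) within each region grouping\n",
--     "  dplyr::group_by(batch, pair_class, broken_status, region_class) %>%\n",
--     "  dplyr::mutate(\n",
--     "    denom = sum(count_sum, na.rm = TRUE),\n",
--     "    pct_intact_repaired = ifelse(denom > 0, 100 * count_sum / denom, NA_real_)\n",
--     "  ) %>%\n",
--     "  dplyr::ungroup() %>%\n",
--     "  dplyr::select(-denom)\n",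
-- ]
--
-- _LABEL_LINE = "        x = 'Region class', y = '% of (T0 + T120) within region', fill = 'Time'\n"
--
--
-- def _splice_blocks(rest: list[str]) -> list[str]:
--     """Slice-and-splice recursion: replace each region_summary..ungroup block."""
--     s = next((k for k, ln in enumerate(rest) if ln.strip() == "region_summary <- df_loc %>%"), None)
--     if s is None:
--         return rest
--     e = next((k for k, ln in enumerate(rest) if k > s and ln.strip() == "dplyr::ungroup()"), None)
--     if e is None:
--         raise RuntimeError("Could not find end of region_summary block (dplyr::ungroup())")
--     return rest[:s] + REPLACEMENT_BLOCK + _splice_blocks(rest[e + 1:])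
--
--
-- def patch_cell_source(src: list[str]) -> list[str]:
--     # Block pass first (recursive splice), then the label substitution as one comprehension.
--     return [_LABEL_LINE if "y = '% intact/repaired" in ln else ln
--             for ln in _splice_blocks(src)]
-- ===== Notes on version B (the rewrite author's own statement) =====
-- stated objective: simpler
-- what changed: A's single index-jumping while loop that interleaves block replacement and label substitution is decomposed into a recursive slice-and-splice pass over the region_summary blocks followed by a separate one-line label-substitution comprehension.
import Mathlib
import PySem

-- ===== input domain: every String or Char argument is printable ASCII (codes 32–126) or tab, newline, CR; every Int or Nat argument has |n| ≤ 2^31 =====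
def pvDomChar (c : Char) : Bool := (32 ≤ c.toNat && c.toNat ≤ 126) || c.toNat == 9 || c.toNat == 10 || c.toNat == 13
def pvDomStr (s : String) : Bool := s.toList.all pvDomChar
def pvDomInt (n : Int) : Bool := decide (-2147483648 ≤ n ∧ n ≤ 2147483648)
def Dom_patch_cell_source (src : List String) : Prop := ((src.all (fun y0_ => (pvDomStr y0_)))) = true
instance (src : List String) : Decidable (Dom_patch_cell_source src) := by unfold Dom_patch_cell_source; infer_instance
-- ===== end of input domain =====

-- B replaces A's index-jumping single loop by a recursive slice-and-splice block pass
-- followed by a separate label-substitution map (objective: simpler decomposition).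

-- shared string constants / predicates
def pvMark (ln : String) : Bool := PySem.Str.strip ln == "region_summary <- df_loc %>%"
def pvUng (ln : String) : Bool := PySem.Str.strip ln == "dplyr::ungroup()"
def pvHasLabel (ln : String) : Bool := PySem.Str.isIn "y = '% intact/repaired" ln
def pvLabelLine : String := "        x = 'Region class', y = '% of (T0 + T120) within region', fill = 'Time'\n"
def pvRB : List String := [
  "region_summary <- df_loc %>%\n",
  "  dplyr::filter(!is.na(pair_class), pair_class %in% c('CIS', 'TRANS')) %>%\n",
  "  dplyr::group_by(batch, pair_class, broken_status, region_class, time_point, time_label) %>%\n",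
  "  dplyr::summarise(count_sum = sum(count, na.rm = TRUE), .groups = 'drop') %>%\n",
  "  # Denominator is (starting + repaired) = (T0 + T120) within each region grouping\n",
  "  dplyr::group_by(batch, pair_class, broken_status, region_class) %>%\n",
  "  dplyr::mutate(\n",
  "    denom = sum(count_sum, na.rm = TRUE),\n",
  "    pct_intact_repaired = ifelse(denom > 0, 100 * count_sum / denom, NA_real_)\n",
  "  ) %>%\n",
  "  dplyr::ungroup() %>%\n",
  "  dplyr::select(-denom)\n"]

-- ===== PORT A =====
-- inner 'while j < len(src)' loop: scan from j for the first line stripping to 'dplyr::ungroup()'.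
-- fuel = src.length - j only makes the loop structurally total; the steps are A's.
def pcFEGo (src : List String) : Nat → Nat → Option Nat
  | 0, _ => none
  | fuel + 1, j =>
    if j < src.length then
      if pvUng (src.getD j "") then some j else pcFEGo src fuel (j + 1)
    else none

def pcFindEnd (src : List String) (j : Nat) : Option Nat := pcFEGo src (src.length - j) j

-- outer 'while i < len(src)' loop of A (index-jumping, with accumulator out); same fuel scheme
def pcLoopGo (src : List String) : Nat → Nat → List String → List String
  | 0, _, out => out
  | fuel + 1, i, out =>
    if i < src.length then
      let line := src.getD i ""
      if pvMark line then
        match pcFindEnd src (i + 1) with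
        | some j => pcLoopGo src fuel (j + 1) (out ++ pvRB)
        | none => out          -- Python raises RuntimeError here (excluded by Pre_)
      else if pvHasLabel line then pcLoopGo src fuel (i + 1) (out ++ [pvLabelLine])
      else pcLoopGo src fuel (i + 1) (out ++ [line])
    else out

def patch_cell_source (src : List String) : List String := pcLoopGo src src.length 0 []

-- ===== PORT B =====
-- label substitution applied to one line (the comprehension body in Source B)
def pvSub (ln : String) : String := if pvHasLabel ln then pvLabelLine else ln

-- recursive slice-and-splice of Source B: replace each region_summary..ungroup block.
-- fuel = rest.length only makes the recursion structurally total; the steps are Source B's.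
def pvSpliceGo : Nat → List String → List String
  | 0, rest => rest
  | fuel + 1, rest =>
    match List.findIdx? pvMark rest with
    | none => rest
    | some s =>
      match List.findIdx? pvUng (rest.drop (s + 1)) with
      | none => rest.take s    -- Python raises RuntimeError here (excluded by Pre_)
      | some k => rest.take s ++ pvRB ++ pvSpliceGo fuel (rest.drop (s + 1 + k + 1))

def pvSplice (rest : List String) : List String := pvSpliceGo rest.length rest

def patch_cell_source_alt (src : List String) : List String :=
  (pvSplice src).map pvSub

-- ===== PRECONDITION & SPEC =====
-- Pre_ excludes exactly the inputs on which the Python (both A and B) raises RuntimeError: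
-- some line stripping to 'region_summary <- df_loc %>%' has no later line stripping to 'dplyr::ungroup()'.
def Pre_patch_cell_source (src : List String) : Prop :=
  ∀ i < src.length, pvMark (src.getD i "") = true →
    ∃ j < src.length, i < j ∧ pvUng (src.getD j "") = true
instance (src : List String) : Decidable (Pre_patch_cell_source src) := by
  unfold Pre_patch_cell_source; infer_instance

def pvWitness_patch_cell_source : List String :=
  ["plot\n", "region_summary <- df_loc %>%\n", "  old\n", "  dplyr::ungroup()\n", "  y = '% intact/repaired'\n"]

def Spec_patch_cell_source (src : List String) (out : List String) : Prop := out = patch_cell_source_alt src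
instance (src : List String) (out : List String) : Decidable (Spec_patch_cell_source src out) := by unfold Spec_patch_cell_source; infer_instance

-- ===== CLAIM (what is proved, stated in full; the proofs are below) =====
def Claim_equal_patch_cell_source : Prop := ∀ (src : List String), Dom_patch_cell_source src → Pre_patch_cell_source src → Spec_patch_cell_source src (patch_cell_source src)

-- ===== LEMMAS AND PROOFS =====

-- suffix-structured restatement of A's loop (proof helper)
def pvAList : List String → List String → List String
  | [], out => out
  | line :: r, out =>
    if pvMark line then
      match List.findIdx? pvUng r with
      | some k => pvAList (r.drop (k + 1)) (out ++ pvRB)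
      | none => out
    else pvAList r (out ++ [pvSub line])
termination_by t _ => t.length
decreasing_by
  · simp only [List.length_drop, List.length_cons]; omega
  · simp

theorem pvRB_map_sub : pvRB.map pvSub = pvRB := by decide

theorem getD_drop (t : List String) (m i : Nat) :
    (t.drop m).getD i "" = t.getD (m + i) "" := by
  simp [List.getD_eq_getElem?_getD, List.getElem?_drop]

theorem pre_drop (t : List String) (m : Nat) (h : Pre_patch_cell_source t) :
    Pre_patch_cell_source (t.drop m) := by
  intro i hi hm
  rw [getD_drop] at hm
  obtain ⟨j, hj, hij, hu⟩ := h (m + i) (by simp at hi; omega) hm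
  refine ⟨j - m, by simp; omega, by omega, ?_⟩
  rw [getD_drop]
  have : m + (j - m) = j := by omega
  rw [this]; exact hu

theorem pre_tail (line : String) (r : List String)
    (h : Pre_patch_cell_source (line :: r)) : Pre_patch_cell_source r := by
  have := pre_drop (line :: r) 1 h
  simpa using this

-- pcFEGo (with enough fuel) is 'first index ≥ j0 whose line strips to ungroup'
theorem pcFEGo_eq (src : List String) :
    ∀ fuel j0, src.length - j0 ≤ fuel →
      pcFEGo src fuel j0 = (List.findIdx? pvUng (src.drop j0)).map (· + j0) := by
  intro fuel
  induction fuel with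
  | zero =>
    intro j0 hn
    rw [pcFEGo, List.drop_eq_nil_of_le (by omega)]
    simp
  | succ fuel ih =>
    intro j0 hn
    rw [pcFEGo]
    by_cases hj : j0 < src.length
    · rw [if_pos hj]
      have hdrop : src.drop j0 = src[j0] :: src.drop (j0 + 1) := (List.getElem_cons_drop hj).symm
      rw [List.getD_eq_getElem src "" hj, hdrop, List.findIdx?_cons]
      by_cases hu : pvUng src[j0]
      · simp [hu]
      · rw [if_neg hu, if_neg hu, ih (j0 + 1) (by omega)]
        cases List.findIdx? pvUng (src.drop (j0 + 1)) with
        | none => simp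
        | some k => simp; omega
    · rw [if_neg hj, List.drop_eq_nil_of_le (by omega)]
      simp

theorem pcFindEnd_eq (src : List String) (j0 : Nat) :
    pcFindEnd src j0 = (List.findIdx? pvUng (src.drop j0)).map (· + j0) :=
  pcFEGo_eq src (src.length - j0) j0 le_rfl

-- A's index loop equals the suffix-structured loop
theorem pcLoopGo_eq (src : List String) :
    ∀ fuel i out, src.length - i ≤ fuel → pcLoopGo src fuel i out = pvAList (src.drop i) out := by
  intro fuel
  induction fuel with
  | zero =>
    intro i out hn
    rw [pcLoopGo, List.drop_eq_nil_of_le (by omega), pvAList]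
  | succ fuel ih =>
    intro i out hn
    by_cases hi : i < src.length
    · have hdrop : src.drop i = src[i] :: src.drop (i + 1) := (List.getElem_cons_drop hi).symm
      rw [pcLoopGo, if_pos hi, hdrop, pvAList]
      simp only [List.getD_eq_getElem src "" hi]
      by_cases hm : pvMark src[i]
      · rw [if_pos hm, if_pos hm, pcFindEnd_eq]
        cases hfi : List.findIdx? pvUng (src.drop (i + 1)) with
        | none => rfl
        | some k =>
          simp only [Option.map_some]
          rw [ih (k + (i + 1) + 1) (out ++ pvRB) (by omega)]
          rw [List.drop_drop]
          have : i + 1 + (k + 1) = k + (i + 1) + 1 := by omega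
          rw [this]
      · rw [if_neg hm, if_neg hm]
        by_cases hl : pvHasLabel src[i]
        · rw [if_pos hl, ih (i + 1) _ (by omega)]
          simp [pvSub, hl]
        · rw [if_neg hl, ih (i + 1) _ (by omega)]
          simp [pvSub, hl]
    · rw [pcLoopGo, if_neg hi, List.drop_eq_nil_of_le (by omega), pvAList]

theorem pvSpliceGo_nil (fuel : Nat) : pvSpliceGo fuel [] = [] := by
  cases fuel with
  | zero => rfl
  | succ fuel => rw [pvSpliceGo]; simp

-- pvSpliceGo does not depend on the fuel once it covers the list length
theorem pvSpliceGo_fuel :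
    ∀ fuel fuel' rest, rest.length ≤ fuel → rest.length ≤ fuel' →
      pvSpliceGo fuel rest = pvSpliceGo fuel' rest := by
  intro fuel
  induction fuel with
  | zero =>
    intro fuel' rest h h'
    have : rest = [] := List.eq_nil_of_length_eq_zero (by omega)
    subst this
    rw [pvSpliceGo_nil, pvSpliceGo_nil]
  | succ fuel ih =>
    intro fuel' rest h h'
    cases fuel' with
    | zero =>
      have : rest = [] := List.eq_nil_of_length_eq_zero (by omega)
      subst this
      rw [pvSpliceGo_nil, pvSpliceGo_nil]
    | succ fuel' =>
      rw [pvSpliceGo, pvSpliceGo]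
      cases hs : List.findIdx? pvMark rest with
      | none => rfl
      | some s =>
        show (match List.findIdx? pvUng (rest.drop (s + 1)) with
              | none => rest.take s
              | some k => rest.take s ++ pvRB ++ pvSpliceGo fuel (rest.drop (s + 1 + k + 1))) =
             (match List.findIdx? pvUng (rest.drop (s + 1)) with
              | none => rest.take s
              | some k => rest.take s ++ pvRB ++ pvSpliceGo fuel' (rest.drop (s + 1 + k + 1)))
        cases hk : List.findIdx? pvUng (rest.drop (s + 1)) with
        | none => rfl
        | some k =>
          have hslt : s < rest.length := (List.findIdx?_eq_some_iff_findIdx_eq.mp hs).1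
          have hlen : (rest.drop (s + 1 + k + 1)).length ≤ fuel := by
            simp only [List.length_drop]; omega
          have hlen' : (rest.drop (s + 1 + k + 1)).length ≤ fuel' := by
            simp only [List.length_drop]; omega
          show rest.take s ++ pvRB ++ pvSpliceGo fuel (rest.drop (s + 1 + k + 1)) =
            rest.take s ++ pvRB ++ pvSpliceGo fuel' (rest.drop (s + 1 + k + 1))
          rw [ih fuel' _ hlen hlen']

-- one-step unfolding of B's splice through the fuel wrapper
theorem pvSplice_unfold (rest : List String) :
    pvSplice rest =
      match List.findIdx? pvMark rest with
      | none => rest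
      | some s =>
        match List.findIdx? pvUng (rest.drop (s + 1)) with
        | none => rest.take s
        | some k => rest.take s ++ pvRB ++ pvSplice (rest.drop (s + 1 + k + 1)) := by
  cases hrest : rest with
  | nil => rw [pvSplice, pvSpliceGo_nil]; simp
  | cons x xs =>
    rw [pvSplice]
    simp only [List.length_cons]
    rw [pvSpliceGo]
    cases hs : List.findIdx? pvMark (x :: xs) with
    | none => rfl
    | some s =>
      show (match List.findIdx? pvUng ((x :: xs).drop (s + 1)) with
            | none => List.take s (x :: xs)
            | some k => List.take s (x :: xs) ++ pvRB ++
                pvSpliceGo xs.length ((x :: xs).drop (s + 1 + k + 1))) =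
           (match List.findIdx? pvUng ((x :: xs).drop (s + 1)) with
            | none => List.take s (x :: xs)
            | some k => List.take s (x :: xs) ++ pvRB ++
                pvSplice ((x :: xs).drop (s + 1 + k + 1)))
      cases hk : List.findIdx? pvUng ((x :: xs).drop (s + 1)) with
      | none => rfl
      | some k =>
        have hslt : s < (x :: xs).length := (List.findIdx?_eq_some_iff_findIdx_eq.mp hs).1
        show List.take s (x :: xs) ++ pvRB ++ pvSpliceGo xs.length ((x :: xs).drop (s + 1 + k + 1)) =
          List.take s (x :: xs) ++ pvRB ++ pvSplice ((x :: xs).drop (s + 1 + k + 1))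
        rw [pvSpliceGo_fuel xs.length ((x :: xs).drop (s + 1 + k + 1)).length _
          (by simp only [List.length_drop, List.length_cons] at hslt ⊢; omega) le_rfl]
        rfl

-- B's splice commutes with cons on a non-marker line
theorem pvSplice_cons (line : String) (r : List String) (hm : ¬ pvMark line) :
    pvSplice (line :: r) = line :: pvSplice r := by
  rw [pvSplice_unfold (line :: r), pvSplice_unfold r, List.findIdx?_cons, if_neg hm]
  cases hr : List.findIdx? pvMark r with
  | none => simp
  | some s =>
    simp only [Option.map_some]
    rw [List.drop_succ_cons]
    cases hk : List.findIdx? pvUng (r.drop (s + 1)) with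
    | none => simp
    | some k =>
      simp only [List.take_succ_cons, List.cons_append]
      have : s + 1 + 1 + k + 1 = (s + 1 + k + 1) + 1 := by omega
      rw [this, List.drop_succ_cons]

-- main lemma: A's suffix loop = accumulator ++ (B's block pass, then label map)
theorem pvMain_aux :
    ∀ n (t acc : List String), t.length ≤ n → Pre_patch_cell_source t →
      pvAList t acc = acc ++ (pvSplice t).map pvSub := by
  intro n
  induction n with
  | zero =>
    intro t acc hn _
    have : t = [] := List.eq_nil_of_length_eq_zero (by omega)
    subst this
    rw [pvAList, pvSplice, pvSpliceGo_nil]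
    simp
  | succ n ih =>
    intro t acc hn hpre
    cases t with
    | nil => rw [pvAList, pvSplice, pvSpliceGo_nil]; simp
    | cons line r =>
      by_cases hm : pvMark line
      · -- marker block: Pre_ supplies the terminating ungroup line
        obtain ⟨j, hj, hij, hu⟩ := hpre 0 (by simp) (by simpa using hm)
        have hex : ∃ x ∈ r, pvUng x = true := by
          refine ⟨r[j - 1]'(by simp at hj; omega), List.getElem_mem _, ?_⟩
          have : (line :: r).getD j "" = r.getD (j - 1) "" := by
            cases j with
            | zero => omega
            | succ m => simp
          rw [this] at hu
          rwa [List.getD_eq_getElem r "" (by simp at hj; omega)] at hu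
        have hsome : (List.findIdx? pvUng r).isSome := by
          rw [List.findIdx?_isSome]
          simpa [List.any_eq_true] using hex
        obtain ⟨k, hk⟩ := Option.isSome_iff_exists.mp hsome
        rw [pvAList, if_pos hm, hk]
        show pvAList (List.drop (k + 1) r) (acc ++ pvRB) = _
        have hpre' : Pre_patch_cell_source (r.drop (k + 1)) := by
          have := pre_drop (line :: r) (k + 2) hpre
          simpa using this
        have hrhs : pvSplice (line :: r) = pvRB ++ pvSplice (r.drop (k + 1)) := by
          rw [pvSplice_unfold (line :: r), List.findIdx?_cons, if_pos hm]
          show (match List.findIdx? pvUng (List.drop (0 + 1) (line :: r)) with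
                | none => List.take 0 (line :: r)
                | some k => List.take 0 (line :: r) ++ pvRB ++
                    pvSplice (List.drop (0 + 1 + k + 1) (line :: r))) = _
          have h01 : (0 : Nat) + 1 = 1 := rfl
          rw [h01, List.drop_one, List.tail_cons, hk]
          show List.take 0 (line :: r) ++ pvRB ++ pvSplice (List.drop (1 + k + 1) (line :: r)) = _
          have h2 : 1 + k + 1 = (k + 1) + 1 := by omega
          rw [h2, List.drop_succ_cons, List.take_zero]
          simp
        rw [ih (r.drop (k + 1)) (acc ++ pvRB)
          (by simp only [List.length_drop, List.length_cons] at hn ⊢; omega) hpre', hrhs]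
        simp [pvRB_map_sub, List.append_assoc]
      · rw [pvAList, if_neg hm, pvSplice_cons line r hm]
        rw [ih r (acc ++ [pvSub line]) (by simp at hn; omega) (pre_tail line r hpre)]
        simp

-- ===== VERDICT (by name: the statement is the Claim_ definition above) =====
theorem patch_cell_source_spec : Claim_equal_patch_cell_source := by
  intro src _ hpre
  unfold Spec_patch_cell_source patch_cell_source patch_cell_source_alt
  rw [pcLoopGo_eq src src.length 0 [] (by omega)]
  simp only [List.drop_zero]
  rw [pvMain_aux src.length src [] le_rfl hpre]
  simp
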